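-- pv_equiv track=rewrite | github.com/l1ghtspeed/Programming-Notes | Practice Problems/Daily Coding Problem/zillow7ishNumbers.py | solve
-- ===== SOURCE A (Python) =====
-- def solve(n):
--
--     ret = 0
--     bit_place = 0
--
--     while n:
--         if (n & 1):
--             ret += 7 ** bit_place
--
--         n >>= 1
--         bit_place += 1
--
--     return ret
-- ===== SOURCE B (Python) =====
-- def solve(n):
--     ret = 0
--     for c in bin(n)[2:]:
--         ret = ret * 7 + (c == '1')
--     return ret
-- ===== Notes on version B (the rewrite author's own statement) =====
-- stated objective: idiomatic
-- what changed: Horner's method folding the MSB-first binary string (ret = ret*7 + bit) replaces the LSB-first loop that sums 7**bit_place per set bit.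
import Mathlib
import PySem

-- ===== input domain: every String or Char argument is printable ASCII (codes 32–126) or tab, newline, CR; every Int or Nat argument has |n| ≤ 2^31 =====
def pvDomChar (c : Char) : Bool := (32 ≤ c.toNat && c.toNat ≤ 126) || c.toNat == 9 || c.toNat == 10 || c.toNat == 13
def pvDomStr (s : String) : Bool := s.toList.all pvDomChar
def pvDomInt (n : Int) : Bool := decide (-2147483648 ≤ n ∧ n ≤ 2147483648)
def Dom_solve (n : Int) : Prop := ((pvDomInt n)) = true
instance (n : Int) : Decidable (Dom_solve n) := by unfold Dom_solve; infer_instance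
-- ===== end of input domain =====

-- B evaluates n's binary digits MSB-first by Horner's rule (ret = ret*7 + bit) instead of
-- summing 7**bit_place over set bits LSB-first; objective: idiomatic. Pre_ restricts to
-- n ≥ 0, where A's while-loop terminates (on negative n Python's arithmetic shift never
-- reaches 0 and A diverges).


-- ===== PORT A =====
-- the while loop; `n & 1` on n > 0 equals PySem.Int.mod n 2 = 1, `n >>= 1` is floor division
-- by 2.  For n ≤ 0 the loop exits at n = 0 (returns ret); on n < 0 Python diverges (outside
-- Pre_), here the guard just makes the recursion total.
def solveLoop (n ret : Int) (bit_place : Nat) : Int :=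
  if h : n ≤ 0 then ret
  else solveLoop (PySem.Int.floordiv n 2)
      (if PySem.Int.mod n 2 = 1 then ret + 7 ^ bit_place else ret) (bit_place + 1)
termination_by n.toNat
decreasing_by
  have h2 : PySem.Int.floordiv n 2 = n / 2 := PySem.Int.floordiv_eq_ediv_of_pos (by omega)
  rw [h2]; omega

def solve (n : Int) : Int := solveLoop n 0 0

-- ===== PORT B =====
-- bin(n)[2:] for n ≥ 0, as a list of chars MSB first (hand port of the builtin, exact on Pre_)
def binCharsAux : Nat → List Char
  | 0 => []
  | (m + 1) => binCharsAux ((m + 1) / 2) ++ [if (m + 1) % 2 = 1 then '1' else '0']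
decreasing_by exact Nat.div_lt_self (Nat.succ_pos m) (by norm_num)

def solve_alt (n : Int) : Int :=
  let s : List Char := if n = 0 then ['0'] else binCharsAux n.toNat
  s.foldl (fun ret c => ret * 7 + (if c = '1' then 1 else 0)) 0

-- ===== PRECONDITION & SPEC =====
-- Pre_ excludes n < 0, on which A's while loop never terminates (arithmetic right shift of a
-- negative int never reaches 0), so A returns no value there.
def Pre_solve (n : Int) : Prop := 0 ≤ n
instance (n : Int) : Decidable (Pre_solve n) := by unfold Pre_solve; infer_instance
def pvWitness_solve : Int := 6

def Spec_solve (n : Int) (out : Int) : Prop := out = solve_alt n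
instance (n : Int) (out : Int) : Decidable (Spec_solve n out) := by unfold Spec_solve; infer_instance

-- ===== CLAIM (what is proved, stated in full; the proofs are below) =====
def Claim_equal_solve : Prop := ∀ (n : Int), Dom_solve n → Pre_solve n → Spec_solve n (solve n)

-- ===== LEMMAS AND PROOFS =====

-- B's Horner value of m's binary digits
def hval (m : Nat) : Int :=
  (binCharsAux m).foldl (fun ret c => ret * 7 + (if c = '1' then 1 else 0)) 0

lemma hval_succ (m : Nat) :
    hval (m + 1) = 7 * hval ((m + 1) / 2) + ((m + 1) % 2 : Nat) := by
  unfold hval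
  rw [binCharsAux, List.foldl_append]
  simp only [List.foldl_cons, List.foldl_nil]
  rcases Nat.mod_two_eq_zero_or_one (m + 1) with h | h <;> simp [h] <;> ring

lemma loop_eq (m : Nat) : ∀ ret bp, solveLoop (m : Int) ret bp = ret + 7 ^ bp * hval m := by
  induction m using Nat.strong_induction_on with
  | _ m ih =>
    intro ret bp
    match m with
    | 0 => rw [solveLoop]; simp [hval, binCharsAux]
    | (k + 1) =>
      rw [solveLoop]
      have hpos : ¬ ((k + 1 : Nat) : Int) ≤ 0 := by omega
      rw [dif_neg hpos]
      have hfd : PySem.Int.floordiv ((k + 1 : Nat) : Int) 2 = (((k + 1) / 2 : Nat) : Int) := by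
        exact_mod_cast PySem.Int.floordiv_natCast (k + 1) 2
      have hmd : PySem.Int.mod ((k + 1 : Nat) : Int) 2 = (((k + 1) % 2 : Nat) : Int) := by
        exact_mod_cast PySem.Int.mod_natCast (k + 1) 2
      rw [hfd, hmd, ih ((k + 1) / 2) (Nat.div_lt_self (Nat.succ_pos k) (by norm_num))]
      rw [hval_succ]
      rcases Nat.mod_two_eq_zero_or_one (k + 1) with h | h <;>
        simp [h, pow_succ] <;> ring

theorem solve_eq_hval (n : Int) (h : 0 ≤ n) : solve n = hval n.toNat := by
  unfold solve
  have : (n.toNat : Int) = n := Int.toNat_of_nonneg h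
  rw [← this, loop_eq]
  simp only [zero_add, pow_zero, one_mul]
  congr 1

-- ===== VERDICT (by name: the statement is the Claim_ definition above) =====
theorem solve_spec : Claim_equal_solve := by
  intro n _ hpre
  unfold Spec_solve solve_alt
  rw [solve_eq_hval n hpre]
  by_cases h0 : n = 0
  · subst h0; simp [hval, binCharsAux]
  · simp only [if_neg h0]
    rfl
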